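-- pv_equiv track=rewrite | github.com/littlebrotherdi/WLM | apps/image mapping.py | get_max_min_value
-- ===== SOURCE A (Python) =====
-- def get_max_min_value(martix):
--   '''
--   得到矩阵中每一列最大的值
--   '''
--   max_list=[]
--   min_list = []
--   for j in range(len(martix[0])):
--     tmp_list=[]
--     for i in range(len(martix)):
--       tmp_list.append(martix[i][j])
--     max_list.append(max(tmp_list))
--     min_list.append(min(tmp_list))
--   return max_list, min_list
-- ===== SOURCE B (Python) =====
-- def get_max_min_value(martix):
--     max_list = list(martix[0])
--     min_list = list(martix[0])
--     for row in martix[1:]: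
--         max_list = [r if r > m else m for r, m in zip(row, max_list)]
--         min_list = [r if r < m else m for r, m in zip(row, min_list)]
--     return max_list, min_list
-- ===== Notes on version B (the rewrite author's own statement) =====
-- stated objective: alternative
-- what changed: A gathers each column into a temporary list and calls max/min per column; B makes one row-major pass over the matrix, maintaining running per-column max and min lists seeded from row 0.
-- outside the precondition, e.g. on get_max_min_value([]): A raises IndexError, B raises IndexError; on get_max_min_value([[1, 2], [3]]): A raises IndexError, B returns ([3], [1])
import Mathlib
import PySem

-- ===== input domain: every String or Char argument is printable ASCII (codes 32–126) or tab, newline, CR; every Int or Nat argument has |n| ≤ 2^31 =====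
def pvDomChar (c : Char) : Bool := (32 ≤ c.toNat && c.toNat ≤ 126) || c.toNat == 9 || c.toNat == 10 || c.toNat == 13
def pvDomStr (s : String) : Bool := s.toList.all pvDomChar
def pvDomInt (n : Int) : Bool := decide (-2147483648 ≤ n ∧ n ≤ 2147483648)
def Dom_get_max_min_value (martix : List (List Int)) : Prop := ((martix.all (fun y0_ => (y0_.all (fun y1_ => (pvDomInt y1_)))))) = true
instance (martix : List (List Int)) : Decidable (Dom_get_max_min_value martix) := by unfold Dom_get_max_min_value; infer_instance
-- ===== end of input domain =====

-- B replaces A's column-major gather-then-reduce (build each column, call max/min) by a single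
-- row-major pass maintaining running per-column extremes seeded from row 0 (objective: alternative).

-- ===== PORT A =====
-- Literal port of A. Under Pre_ every pyGetD index is in range and tmp is nonempty, so the
-- defaults ([], 0) are never reached there.
def get_max_min_value (martix : List (List Int)) : List Int × List Int :=
  (PySem.List.pyRange 0 (PySem.List.len (martix.headD []))).foldl
    (fun (acc : List Int × List Int) j =>
      let tmp := (PySem.List.pyRange 0 (PySem.List.len martix)).foldl
        (fun t i => t ++ [PySem.List.pyGetD (PySem.List.pyGetD martix i []) j 0]) []
      (acc.1 ++ [(PySem.List.max? tmp (fun y => y)).getD 0],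
       acc.2 ++ [(PySem.List.min? tmp (fun y => y)).getD 0]))
    ([], [])

-- ===== PORT B =====
-- Port of Source B. Python raises IndexError on martix = [] (outside Pre_); the [] branch is the
-- total match arm for that excluded case.
def get_max_min_value_alt (martix : List (List Int)) : List Int × List Int :=
  match martix with
  | [] => ([], [])
  | r0 :: rest =>
    rest.foldl
      (fun (acc : List Int × List Int) row =>
        ((row.zip acc.1).map (fun p => if p.1 > p.2 then p.1 else p.2),
         (row.zip acc.2).map (fun p => if p.1 < p.2 then p.1 else p.2)))
      (r0, r0)

-- ===== PRECONDITION & SPEC =====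
-- Pre_ excludes exactly where Python A raises IndexError: the empty matrix (martix[0]) and
-- ragged matrices with a row shorter than row 0 (martix[i][j]).
def Pre_get_max_min_value (martix : List (List Int)) : Prop :=
  martix ≠ [] ∧ ∀ row ∈ martix, (martix.headD []).length ≤ row.length
instance (martix : List (List Int)) : Decidable (Pre_get_max_min_value martix) := by
  unfold Pre_get_max_min_value; infer_instance
def pvWitness_get_max_min_value : List (List Int) := [[1, 2], [3, 0]]

def Spec_get_max_min_value (martix : List (List Int)) (out : List Int × List Int) : Prop := out = get_max_min_value_alt martix
instance (martix : List (List Int)) (out : List Int × List Int) : Decidable (Spec_get_max_min_value martix out) := by unfold Spec_get_max_min_value; infer_instance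

-- ===== CLAIM (what is proved, stated in full; the proofs are below) =====
def Claim_equal_get_max_min_value : Prop := ∀ (martix : List (List Int)), Dom_get_max_min_value martix → Pre_get_max_min_value martix → Spec_get_max_min_value martix (get_max_min_value martix)

-- ===== LEMMAS AND PROOFS =====

-- any list is the map of its getD over range of its length
theorem pv_map_range_getD (xs : List Int) (d : Int) :
    (List.range xs.length).map (fun j => xs.getD j d) = xs := by
  apply List.ext_getElem
  · simp
  · intro i h1 h2
    simp [List.getElem?_eq_getElem h2]

-- the inner gather loop of A builds exactly column j
theorem pv_colA (martix : List (List Int)) (j : Int) :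
    (PySem.List.pyRange 0 (PySem.List.len martix)).map
        (fun i => PySem.List.pyGetD (PySem.List.pyGetD martix i []) j 0)
      = martix.map (fun row => PySem.List.pyGetD row j 0) := by
  conv_rhs => rw [← PySem.List.map_pyGetD_pyRange_zero martix []]
  rw [List.map_map]; rfl

-- one row-update of B, on a map-over-range accumulator, acts pointwise
theorem pv_one_step (s : Int → Int → Int) (row : List Int) (n : Nat) (g : Nat → Int)
    (h : n ≤ row.length) :
    (row.zip ((List.range n).map g)).map (fun p => s p.1 p.2)
      = (List.range n).map (fun (j : Nat) => s (PySem.List.pyGetD row ((j : Nat) : Int) 0) (g j)) := by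
  apply List.ext_getElem
  · simp [Nat.min_eq_right h]
  · intro i h1 h2
    have hi : i < n := by simpa using h2
    simp only [List.getElem_map, List.getElem_zip, List.getElem_range]
    rw [PySem.List.pyGetD_natCast, List.getD_eq_getElem row 0 (Nat.lt_of_lt_of_le hi h)]

-- B's row fold, started from a map over range, is the pointwise column fold
theorem pv_fold_zip_map (s : Int → Int → Int) (rows : List (List Int)) :
    ∀ (n : Nat) (g : Nat → Int), (∀ r ∈ rows, n ≤ r.length) →
    rows.foldl (fun acc row => (row.zip acc).map (fun p => s p.1 p.2)) ((List.range n).map g)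
      = (List.range n).map
          (fun (j : Nat) => rows.foldl (fun m row => s (PySem.List.pyGetD row ((j : Nat) : Int) 0) m) (g j)) := by
  induction rows with
  | nil => intro n g _; rfl
  | cons row rows ih =>
    intro n g h
    simp only [List.foldl_cons]
    rw [pv_one_step s row n g (h row (by simp)),
      ih n (fun (j : Nat) => s (PySem.List.pyGetD row ((j : Nat) : Int) 0) (g j))
        (fun r hr => h r (by simp [hr]))]

theorem pv_if_gt_eq_max (m a : Int) : (if a > m then a else m) = max m a := by
  rcases max_cases m a with ⟨h1, h2⟩ | ⟨h1, h2⟩ <;> rw [h1] <;> split <;> omega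

theorem pv_if_lt_eq_min (m a : Int) : (if a < m then a else m) = min m a := by
  rcases min_cases m a with ⟨h1, h2⟩ | ⟨h1, h2⟩ <;> rw [h1] <;> split <;> omega

-- ===== VERDICT (by name: the statement is the Claim_ definition above) =====
theorem get_max_min_value_spec : Claim_equal_get_max_min_value := by
  intro martix _ hpre
  obtain ⟨hne, hlen⟩ := hpre
  obtain ⟨r0, rest, rfl⟩ : ∃ r0 rest, martix = r0 :: rest := by
    cases martix with
    | nil => exact absurd rfl hne
    | cons a b => exact ⟨a, b, rfl⟩
  unfold Spec_get_max_min_value get_max_min_value get_max_min_value_alt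
  have hrest : ∀ r ∈ rest, r0.length ≤ r.length := by
    intro r hr; simpa using hlen r (by simp [hr])
  -- split both pair folds into their components (simp only [] zeta/iota-reduces the let and the match)
  simp only []
  rw [PySem.List.foldl_prod_mk
        (fun (x : List Int) (j : Int) => x ++ [(PySem.List.max? ((PySem.List.pyRange 0 (PySem.List.len (r0 :: rest))).foldl
          (fun t i => t ++ [PySem.List.pyGetD (PySem.List.pyGetD (r0 :: rest) i []) j 0]) [])
          (fun y => y)).getD 0])
        (fun (x : List Int) (j : Int) => x ++ [(PySem.List.min? ((PySem.List.pyRange 0 (PySem.List.len (r0 :: rest))).foldl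
          (fun t i => t ++ [PySem.List.pyGetD (PySem.List.pyGetD (r0 :: rest) i []) j 0]) [])
          (fun y => y)).getD 0]),
      PySem.List.foldl_prod_mk
        (fun (x : List Int) (row : List Int) =>
          (row.zip x).map (fun p => if p.1 > p.2 then p.1 else p.2))
        (fun (x : List Int) (row : List Int) =>
          (row.zip x).map (fun p => if p.1 < p.2 then p.1 else p.2))]
  -- A side: outer loop appends, so each component is a map over the range of columns
  rw [PySem.List.foldl_append_singleton_eq_map
        (fun j => (PySem.List.max? ((PySem.List.pyRange 0 (PySem.List.len (r0 :: rest))).foldl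
          (fun t i => t ++ [PySem.List.pyGetD (PySem.List.pyGetD (r0 :: rest) i []) j 0]) [])
          (fun y => y)).getD 0),
      PySem.List.foldl_append_singleton_eq_map
        (fun j => (PySem.List.min? ((PySem.List.pyRange 0 (PySem.List.len (r0 :: rest))).foldl
          (fun t i => t ++ [PySem.List.pyGetD (PySem.List.pyGetD (r0 :: rest) i []) j 0]) [])
          (fun y => y)).getD 0)]
  -- B side: seed r0 written as a map over range, then the row fold becomes pointwise
  conv_rhs =>
    rw [show r0 = (List.range r0.length).map (fun j => r0.getD j 0) from
          (pv_map_range_getD r0 0).symm]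
    rw [pv_fold_zip_map (fun a b => if a > b then a else b) rest r0.length _ hrest,
        pv_fold_zip_map (fun a b => if a < b then a else b) rest r0.length _ hrest]
  -- reduce A's inner gather to the column, max?/min? to running folds, and align indices
  simp only [List.nil_append, PySem.List.foldl_append_singleton_eq_map, pv_colA,
    List.map_cons, PySem.List.max?_id_cons, PySem.List.min?_id_cons, Option.getD_some,
    List.foldl_map, pv_if_gt_eq_max, pv_if_lt_eq_min]
  simp only [List.headD_cons, PySem.List.len_eq, PySem.List.pyRange_zero_nat, List.map_map]
  simp [Function.comp, PySem.List.pyGetD_natCast]
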